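-- pv_equiv track=rewrite | github.com/cheldon-cn/leaflet_map_server | arcpro/script/performance_optimizer.py | _group_projects_by_complexity
-- ===== SOURCE A (Python) =====
-- from typing import Optional, Dict, Any, List, Tuple
--
-- def _group_projects_by_complexity(project_list: List[str]) -> List[List[str]]:
--     """按复杂度分组工程"""
--     # 简化实现，实际应该分析每个工程
--     groups = []
--
--     # 这里将工程分为三组：简单、中等、复杂
--     simple_projects = []
--     medium_projects = []
--     complex_projects = []
--
--     for i, project in enumerate(project_list):
--         # 根据工程索引简单分组（实际应该分析工程内容）
--         if i % 3 == 0: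
--             simple_projects.append(project)
--         elif i % 3 == 1:
--             medium_projects.append(project)
--         else:
--             complex_projects.append(project)
--
--     if simple_projects:
--         groups.append(simple_projects)
--     if medium_projects:
--         groups.append(medium_projects)
--     if complex_projects:
--         groups.append(complex_projects)
--
--     return groups
-- ===== SOURCE B (Python) =====
-- from typing import List
--
-- def _group_projects_by_complexity(project_list: List[str]) -> List[List[str]]:
--     """按复杂度分组工程 (strided-slice reformulation)"""
--     groups = [project_list[i::3] for i in range(3)]
--     return [g for g in groups if g]
-- ===== Notes on version B (the rewrite author's own statement) =====
-- stated objective: idiomatic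
-- what changed: Replaces the single enumerate loop with mod-3 three-way dispatch into accumulators by three independent strided slices project_list[i::3] followed by a filter dropping empty groups.
import Mathlib
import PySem

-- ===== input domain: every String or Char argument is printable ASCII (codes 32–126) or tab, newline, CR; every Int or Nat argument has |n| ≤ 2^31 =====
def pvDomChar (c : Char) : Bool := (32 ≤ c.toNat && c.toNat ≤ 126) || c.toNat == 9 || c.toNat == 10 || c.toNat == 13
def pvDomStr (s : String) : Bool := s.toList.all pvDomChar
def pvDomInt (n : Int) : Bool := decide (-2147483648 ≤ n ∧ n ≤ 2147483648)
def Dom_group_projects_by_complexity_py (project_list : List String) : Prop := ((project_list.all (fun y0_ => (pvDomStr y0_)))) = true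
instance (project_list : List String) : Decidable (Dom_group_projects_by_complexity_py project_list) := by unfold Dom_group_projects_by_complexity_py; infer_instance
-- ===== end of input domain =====

-- B replaces A's enumerate loop with mod-3 dispatch by three strided slices plus a filter (objective: idiomatic; same O(n) cost).

-- ===== PORT A =====
-- the body of A's for-loop: dispatch on i % 3 into the three accumulators
def pvAStep (st : List String × List String × List String) (ip : Int × String) :
    List String × List String × List String :=
  if ip.1 % 3 == 0 then (st.1 ++ [ip.2], st.2.1, st.2.2)
  else if ip.1 % 3 == 1 then (st.1, st.2.1 ++ [ip.2], st.2.2)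
  else (st.1, st.2.1, st.2.2 ++ [ip.2])

def group_projects_by_complexity_py (project_list : List String) : List (List String) :=
  let st := (PySem.List.enumerate project_list 0).foldl pvAStep ([], [], [])
  let groups : List (List String) := []
  let groups := if st.1 = [] then groups else groups ++ [st.1]
  let groups := if st.2.1 = [] then groups else groups ++ [st.2.1]
  let groups := if st.2.2 = [] then groups else groups ++ [st.2.2]
  groups

-- ===== PORT B =====
-- l[i::3] for 0 ≤ i < 3 ≤ nonneg start, step 3: exact as pvEvery3 (l.drop i)
def pvEvery3 : List String → List String
  | [] => []
  | x :: xs => x :: pvEvery3 (xs.drop 2)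
termination_by l => l.length
decreasing_by simp

def group_projects_by_complexity_py_alt (project_list : List String) : List (List String) :=
  let groups := [pvEvery3 project_list, pvEvery3 (project_list.drop 1), pvEvery3 (project_list.drop 2)]
  groups.filter (fun g => !g.isEmpty)

-- ===== PRECONDITION & SPEC =====
def Spec_group_projects_by_complexity_py (project_list : List String) (out : List (List String)) : Prop := out = group_projects_by_complexity_py_alt project_list
instance (project_list : List String) (out : List (List String)) : Decidable (Spec_group_projects_by_complexity_py project_list out) := by unfold Spec_group_projects_by_complexity_py; infer_instance

-- ===== CLAIM (what is proved, stated in full; the proofs are below) =====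
def Claim_equal_group_projects_by_complexity_py : Prop := ∀ (project_list : List String), Dom_group_projects_by_complexity_py project_list → Spec_group_projects_by_complexity_py project_list (group_projects_by_complexity_py project_list)

-- ===== LEMMAS AND PROOFS =====

theorem pvLoop3 (l : List String) : ∀ (k : Int) (s m c : List String),
    (PySem.List.enumerate l (3 * k)).foldl pvAStep (s, m, c)
      = (s ++ pvEvery3 l, m ++ pvEvery3 (l.drop 1), c ++ pvEvery3 (l.drop 2)) := by
  match l with
  | [] => intro k s m c; simp [PySem.List.enumerate_nil, pvEvery3]
  | [a] =>
      intro k s m c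
      have h0 : (3 * k) % 3 = 0 := by omega
      simp [PySem.List.enumerate_cons, PySem.List.enumerate_nil, pvAStep, h0, pvEvery3]
  | [a, b] =>
      intro k s m c
      have h0 : (3 * k) % 3 = 0 := by omega
      have h1 : (3 * k + 1) % 3 = 1 := by omega
      simp [PySem.List.enumerate_cons, PySem.List.enumerate_nil, pvAStep, h0, h1, pvEvery3]
  | a :: b :: c' :: t =>
      intro k s m c
      have h0 : (3 * k) % 3 = 0 := by omega
      have h1 : (3 * k + 1) % 3 = 1 := by omega
      have h2 : (3 * k + 1 + 1) % 3 = 2 := by omega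
      have h3 : (3 * k + 1 + 1 + 1) = 3 * (k + 1) := by ring
      have ih := pvLoop3 t (k + 1) (s ++ [a]) (m ++ [b]) (c ++ [c'])
      simp only [PySem.List.enumerate_cons, List.foldl_cons, pvAStep, h0, h1, h2, h3] at *
      simp [ih, pvEvery3]

-- ===== VERDICT (by name: the statement is the Claim_ definition above) =====
theorem group_projects_by_complexity_py_spec : Claim_equal_group_projects_by_complexity_py := by
  intro l _
  unfold Spec_group_projects_by_complexity_py group_projects_by_complexity_py group_projects_by_complexity_py_alt
  have h := pvLoop3 l 0 [] [] []
  simp only [mul_zero] at h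
  rw [h]
  have eB : ∀ x : List String, x.isEmpty = decide (x = []) := by
    intro x; cases x <;> simp
  simp only [eB]
  by_cases h1 : pvEvery3 l = [] <;>
  by_cases h2 : pvEvery3 l.tail = [] <;>
  by_cases h3 : pvEvery3 (l.drop 2) = [] <;>
  simp [List.filter, h1, h2, h3]
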